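-- pv_equiv track=rewrite | github.com/Marytem/UCU_Courses | programming_basics/лаб10/Maryana_Temnyk_number_operations.py | numbers_Ulam
-- ===== SOURCE A (Python) =====
-- def numbers_Ulam(n):
--     """
--     positive integers -> list
--     Return a list of first n numbers from Ulam's sequence.
--     >>> numbers_Ulam(10)
--     [1, 2, 3, 4, 6, 8, 11, 13, 16, 18]
--     >>> numbers_Ulam(5)
--     [1, 2, 3, 4, 6]
--     """
--     seq = [1, 2]
--     if n == 1:
--         return [seq[0]]
--     if n == 2:
--         return seq
--     a = 2000  # till that value Ulam's sequence will be calculated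
--     for m in range(3, a):
--         waysget = 0
--         for a in range(len(seq)):
--             for b in range(a + 1, len(seq)):
--                 if seq[a] + seq[b] == m:
--                     waysget += 1
--                 else:
--                     continue
--             if waysget > 1:
--                 break
--         if n > 43:  #if a = 200, 43 numbers of Ulam's sequence are calculated.
--             a += 20  #In this way m is always less than a.
--         if waysget == 1:
--             seq.append(m)
--     if m > seq[-1] and waysget == 1:
--         seq.append(m)
--     return seq[:n]
-- ===== SOURCE B (Python) =====
-- def numbers_Ulam(n):
--     """
--     positive integers -> list
--     Return a list of first n numbers from Ulam's sequence.
--     Incremental method: cnt[x] holds the number of pairs of distinct current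
--     Ulam terms summing to x; when a term is accepted, only its sums with the
--     existing terms are added, so no pair scan per candidate is needed.
--     """
--     limit = 2000  # same cut-off as the original
--     seq = [1, 2]
--     cnt = [0] * (2 * limit)
--     cnt[3] = 1
--     for m in range(3, limit):
--         if cnt[m] == 1:
--             for s in seq:
--                 cnt[m + s] += 1
--             seq.append(m)
--     return seq[:n]
-- ===== Notes on version B (the rewrite author's own statement) =====
-- stated objective: faster
-- what changed: Replaces A's per-candidate double scan over all pairs of current terms by a representation-count array updated incrementally each time a term is accepted, so each candidate m is decided by one O(1) lookup.
import Mathlib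
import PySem

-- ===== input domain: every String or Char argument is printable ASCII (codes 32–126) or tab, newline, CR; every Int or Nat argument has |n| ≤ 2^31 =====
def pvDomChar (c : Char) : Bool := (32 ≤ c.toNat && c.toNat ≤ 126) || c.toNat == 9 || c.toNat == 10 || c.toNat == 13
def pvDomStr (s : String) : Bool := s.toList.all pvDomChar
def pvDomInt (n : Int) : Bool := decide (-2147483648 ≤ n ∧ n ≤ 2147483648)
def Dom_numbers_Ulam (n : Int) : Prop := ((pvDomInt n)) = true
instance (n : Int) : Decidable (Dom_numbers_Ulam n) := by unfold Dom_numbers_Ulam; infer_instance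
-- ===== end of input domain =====

-- B replaces A's per-candidate pair scan by a representation-count list updated
-- once per accepted term (objective: faster; measured).

-- ===== PORT A =====
-- inner loop 'for b in range(a+1, len(seq)): if seq[a]+seq[b] == m: waysget += 1'
def ulamBLoop (seq : List Int) (m : Int) (a : Nat) (w : Int) : Int :=
  (PySem.List.pyRange ((a : Int) + 1) (seq.length : Int) 1).foldl
    (fun w b =>
      if PySem.List.pyGetD seq (a : Int) 0 + PySem.List.pyGetD seq b 0 = m then w + 1 else w) w

-- 'for a in range(len(seq)): …  if waysget > 1: break'
def ulamALoop (seq : List Int) (m : Int) (a : Nat) (w : Int) : Int :=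
  if _h : a < seq.length then
    let w' := ulamBLoop seq m a w
    if w' > 1 then w' else ulamALoop seq m (a + 1) w'
  else w
termination_by seq.length - a

-- one iteration of 'for m in range(3, a)'; state = (seq, m, waysget).
-- ('if n > 43: a += 20' only reassigns the variable a, which is dead: the range
--  object range(3, 2000) was materialised before the loop and a is never read again.)
def ulamStepA (st : List Int × Int × Int) (m : Int) : List Int × Int × Int :=
  let w := ulamALoop st.1 m 0 0
  (if w = 1 then st.1 ++ [m] else st.1, m, w)

def numbers_Ulam (n : Int) : List Int :=
  let seq : List Int := [1, 2]
  if n = 1 then [PySem.List.pyGetD seq 0 0]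
  else if n = 2 then seq
  else
    let st := (PySem.List.pyRange 3 2000 1).foldl ulamStepA (seq, 0, 0)
    let seq := if st.2.1 > PySem.List.pyGetD st.1 (-1) 0 ∧ st.2.2 = 1
               then st.1 ++ [st.2.1] else st.1
    PySem.List.slice seq none (some n)

-- ===== PORT B =====
-- 'for s in seq: cnt[m + s] += 1' followed by 'seq.append(m)'
def ulamStepB (st : List Int × List Int) (m : Int) : List Int × List Int :=
  if PySem.List.pyGetD st.2 m 0 = 1 then
    (st.1 ++ [m],
     st.1.foldl (fun c s =>
       PySem.List.pySetD c (m + s) (PySem.List.pyGetD c (m + s) 0 + 1)) st.2)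
  else st

def numbers_Ulam_alt (n : Int) : List Int :=
  let cnt := PySem.List.pySetD (List.replicate (2 * 2000) (0 : Int)) 3 1
  let st := (PySem.List.pyRange 3 2000 1).foldl ulamStepB ([1, 2], cnt)
  PySem.List.slice st.1 none (some n)

-- ===== PRECONDITION & SPEC =====
def Spec_numbers_Ulam (n : Int) (out : List Int) : Prop := out = numbers_Ulam_alt n
instance (n : Int) (out : List Int) : Decidable (Spec_numbers_Ulam n out) := by unfold Spec_numbers_Ulam; infer_instance

-- ===== CLAIM (what is proved, stated in full; the proofs are below) =====
def Claim_equal_numbers_Ulam : Prop := ∀ (n : Int), Dom_numbers_Ulam n → Spec_numbers_Ulam n (numbers_Ulam n)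

-- ===== LEMMAS AND PROOFS =====

-- number of index pairs i < j with xs[i] + xs[j] = m
def pairCnt : List Int → Int → Nat
  | [], _ => 0
  | x :: xs, m => xs.countP (fun y => x + y == m) + pairCnt xs m

-- the B-side representation-count invariant
def cntInv (seq cnt : List Int) : Prop :=
  cnt.length = 4000 ∧ ∀ x : Nat, x < 4000 → cnt.getD x 0 = (pairCnt seq (x : Int) : Int)

theorem bfold_eq (seq : List Int) (c m : Int) :
    ∀ j : Nat, ∀ w : Int,
      (PySem.List.pyRange (j : Int) (seq.length : Int) 1).foldl
        (fun w b => if c + PySem.List.pyGetD seq b 0 = m then w + 1 else w) w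
      = w + ((seq.drop j).countP (fun y => c + y == m) : Int) := by
  intro j
  induction hk : seq.length - j using Nat.strong_induction_on generalizing j with
  | _ k ih =>
  intro w
  by_cases h : j < seq.length
  · rw [PySem.List.pyRange_one_cons (by exact_mod_cast h)]
    have hj1 : ((j : Int) + 1) = ((j + 1 : Nat) : Int) := by push_cast; ring
    rw [List.foldl_cons, hj1, ih (seq.length - (j+1)) (by omega) (j+1) rfl]
    rw [List.drop_eq_getElem_cons h, List.countP_cons]
    have hg : PySem.List.pyGetD seq (j : Int) 0 = seq[j] := by
      rw [PySem.List.pyGetD_natCast, List.getD_eq_getElem _ _ h]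
    rw [hg]
    by_cases hc : c + seq[j] = m
    · simp [hc]; ring
    · have : (c + seq[j] == m) = false := by simp [hc]
      simp [hc, this]
  · rw [PySem.List.pyRange_one_eq_nil (by exact_mod_cast Nat.le_of_not_lt h)]
    rw [List.drop_eq_nil_of_le (Nat.le_of_not_lt h)]
    simp

theorem ulamBLoop_eq (seq : List Int) (m : Int) (a : Nat) (ha : a < seq.length) (w : Int) :
    ulamBLoop seq m a w
      = w + (((seq.drop (a+1)).countP (fun y => seq[a] + y == m) : Nat) : Int) := by
  unfold ulamBLoop
  have hg : PySem.List.pyGetD seq (a : Int) 0 = seq[a] := by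
    rw [PySem.List.pyGetD_natCast, List.getD_eq_getElem _ _ ha]
  have hj1 : ((a : Int) + 1) = ((a + 1 : Nat) : Int) := by push_cast; ring
  rw [hg, hj1, bfold_eq]

theorem aloop_eq_one (seq : List Int) (m : Int) :
    ∀ k a : Nat, ∀ w : Int, seq.length - a ≤ k → 0 ≤ w →
      (ulamALoop seq m a w = 1 ↔ w + (pairCnt (seq.drop a) m : Int) = 1) := by
  intro k
  induction k with
  | zero =>
    intro a w hk hw
    have ha : ¬ a < seq.length := by omega
    rw [ulamALoop, dif_neg ha, List.drop_eq_nil_of_le (by omega)]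
    simp [pairCnt]
  | succ k ih =>
    intro a w hk hw
    by_cases ha : a < seq.length
    · rw [ulamALoop, dif_pos ha]
      have hrow := ulamBLoop_eq seq m a ha w
      have hpc : pairCnt (seq.drop a) m
          = (seq.drop (a+1)).countP (fun y => seq[a] + y == m) + pairCnt (seq.drop (a+1)) m := by
        rw [List.drop_eq_getElem_cons ha]; rfl
      by_cases hb : ulamBLoop seq m a w > 1
      · rw [if_pos hb]
        constructor
        · intro h1; omega
        · intro h1
          exfalso
          have : (0:Int) ≤ (pairCnt (seq.drop (a+1)) m : Int) := by positivity
          omega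
      · rw [if_neg hb]
        have hw' : 0 ≤ ulamBLoop seq m a w := by
          have : (0:Int) ≤ ((seq.drop (a+1)).countP (fun y => seq[a] + y == m) : Int) := by positivity
          omega
        rw [ih (a+1) _ (by omega) hw']
        rw [hpc]
        push_cast
        omega
    · rw [ulamALoop, dif_neg ha, List.drop_eq_nil_of_le (by omega)]
      simp [pairCnt]

theorem pairCnt_append (xs : List Int) (t x : Int) :
    pairCnt (xs ++ [t]) x = pairCnt xs x + xs.countP (fun y => y + t == x) := by
  induction xs with
  | nil => simp [pairCnt]
  | cons a xs ih =>
    simp only [List.cons_append, pairCnt, List.countP_cons, List.countP_append, ih,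
      List.countP_nil]
    omega

theorem updfold_eq (m : Int) :
    ∀ (pending cnt : List Int),
      (∀ s ∈ pending, 0 ≤ m + s ∧ (m + s).toNat < cnt.length) →
      (let cnt' := pending.foldl (fun c s =>
          PySem.List.pySetD c (m + s) (PySem.List.pyGetD c (m + s) 0 + 1)) cnt
       cnt'.length = cnt.length ∧
       ∀ x : Nat, x < cnt.length →
         cnt'.getD x 0 = cnt.getD x 0 + (pending.countP (fun s => m + s == (x : Int)) : Int)) := by
  intro pending
  induction pending with
  | nil => intro cnt _; simp
  | cons s pending ih =>
    intro cnt hb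
    obtain ⟨hs0, hsl⟩ := hb s (by simp)
    simp only [List.foldl_cons]
    set c1 : List Int := PySem.List.pySetD cnt (m + s) (PySem.List.pyGetD cnt (m + s) 0 + 1)
      with hc1
    have hlen1 : c1.length = cnt.length := by
      rw [hc1, PySem.List.pySetD_of_nonneg _ _ hs0, List.length_set]
    have hget1 : ∀ x : Nat, x < cnt.length →
        c1.getD x 0 = cnt.getD x 0 + (if (m + s).toNat = x then 1 else 0) := by
      intro x hx
      rw [hc1, PySem.List.pySetD_of_nonneg _ _ hs0]
      rw [List.getD_eq_getElem _ _ (by simpa [List.length_set] using hx),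
          List.getD_eq_getElem _ _ hx, List.getElem_set]
      by_cases he : (m + s).toNat = x
      · rw [if_pos he, if_pos he]
        have hpg : PySem.List.pyGetD cnt (m + s) 0 = cnt[x] := by
          rw [PySem.List.pyGetD_eq_getElem _ _ hs0 (by omega)]
          exact getElem_congr rfl he (by omega)
        rw [hpg]
      · rw [if_neg he, if_neg he]; simp
    obtain ⟨ihl, ihg⟩ := ih c1 (by
      intro u hu
      obtain ⟨h1, h2⟩ := hb u (by simp [hu])
      exact ⟨h1, by omega⟩)
    refine ⟨by omega, ?_⟩
    intro x hx
    rw [ihg x (by omega), hget1 x hx, List.countP_cons]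
    have hcast : ((m + s).toNat = x) ↔ (m + s == (x : Int)) = true := by
      simp; omega
    by_cases he : (m + s).toNat = x
    · rw [if_pos he, if_pos (hcast.mp he)]
      push_cast; ring
    · rw [if_neg he, if_neg (fun h => he (hcast.mpr h))]
      push_cast; ring

theorem main_fold (l : List Int) :
    ∀ (seq cnt : List Int) (mw : Int × Int),
      cntInv seq cnt → (∀ s ∈ seq, 1 ≤ s ∧ s < 2000) → (∀ m ∈ l, 3 ≤ m ∧ m < 2000) →
      (l.foldl ulamStepA (seq, mw)).1 = (l.foldl ulamStepB (seq, cnt)).1 := by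
  induction l with
  | nil => intro seq cnt mw _ _ _; rfl
  | cons m l ih =>
    intro seq cnt mw hinv hel hml
    obtain ⟨hm3, hm2000⟩ := hml m (by simp)
    obtain ⟨hlen, hget⟩ := hinv
    have hcondA : (ulamALoop seq m 0 0 = 1) ↔ (pairCnt seq m = 1) := by
      have h := aloop_eq_one seq m seq.length 0 0 (by omega) (by omega)
      rw [List.drop_zero] at h
      rw [h]
      omega
    have hBidx : PySem.List.pyGetD cnt m 0 = (pairCnt seq m : Int) := by
      rw [PySem.List.pyGetD_eq_getElem _ _ (by omega) (by rw [hlen]; exact_mod_cast by omega)]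
      have h := hget m.toNat (by omega)
      rw [List.getD_eq_getElem _ _ (by omega)] at h
      rw [h, Int.toNat_of_nonneg (by omega)]
    have hcondB : (PySem.List.pyGetD cnt m 0 = 1) ↔ (pairCnt seq m = 1) := by
      rw [hBidx]; omega
    simp only [List.foldl_cons]
    by_cases hc : pairCnt seq m = 1
    · have hA : ulamStepA (seq, mw) m = (seq ++ [m], m, ulamALoop seq m 0 0) := by
        unfold ulamStepA
        simp only [if_pos (hcondA.mpr hc)]
      have hB : ulamStepB (seq, cnt) m
          = (seq ++ [m], seq.foldl (fun c s =>
              PySem.List.pySetD c (m + s) (PySem.List.pyGetD c (m + s) 0 + 1)) cnt) := by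
        unfold ulamStepB
        simp only [if_pos (hcondB.mpr hc)]
      rw [hA, hB]
      obtain ⟨hl', hg'⟩ := updfold_eq m seq cnt (by
        intro s hs
        obtain ⟨h1, h2⟩ := hel s hs
        refine ⟨by omega, by rw [hlen]; omega⟩)
      apply ih
      · refine ⟨by omega, ?_⟩
        intro x hx
        rw [hg' x (by omega), hget x hx, pairCnt_append]
        have hcg : seq.countP (fun s => m + s == (x : Int))
            = seq.countP (fun y => y + m == (x : Int)) :=
          List.countP_congr (fun a _ => by
            constructor <;> intro h <;> simp_all <;> omega)
        rw [hcg]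
        push_cast; ring
      · intro s hs
        rcases List.mem_append.mp hs with h | h
        · exact hel s h
        · simp at h; omega
      · intro m' hm'; exact hml m' (by simp [hm'])
    · have hA : ulamStepA (seq, mw) m = (seq, m, ulamALoop seq m 0 0) := by
        unfold ulamStepA
        simp only [if_neg (fun h => hc (hcondA.mp h))]
      have hB : ulamStepB (seq, cnt) m = (seq, cnt) := by
        unfold ulamStepB
        simp only [if_neg (fun h => hc (hcondB.mp h))]
      rw [hA, hB]
      exact ih seq cnt _ ⟨hlen, hget⟩ hel (fun m' hm' => hml m' (by simp [hm']))

theorem stepA_last (st : List Int × Int × Int) (m : Int) :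
    (ulamStepA st m).2.2 = 1 →
    PySem.List.pyGetD (ulamStepA st m).1 (-1) 0 = (ulamStepA st m).2.1 := by
  unfold ulamStepA
  intro h
  simp only at h ⊢
  rw [if_pos h]
  exact PySem.List.pyGetD_neg_one_append_singleton _ _ _

-- after the loop: if waysget == 1 then m is seq's last element, so the trailing
-- 'if m > seq[-1] and waysget == 1' never appends
theorem lastA (l : List Int) :
    ∀ (st : List Int × Int × Int) (m : Int),
      (l.foldl ulamStepA (ulamStepA st m)).2.2 = 1 →
      PySem.List.pyGetD (l.foldl ulamStepA (ulamStepA st m)).1 (-1) 0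
        = (l.foldl ulamStepA (ulamStepA st m)).2.1 := by
  induction l with
  | nil => intro st m; exact stepA_last st m
  | cons m' l ih =>
    intro st m
    simpa using ih (ulamStepA st m) m'

theorem prefixB (l : List Int) :
    ∀ (seq cnt : List Int), ∃ t, (l.foldl ulamStepB (seq, cnt)).1 = seq ++ t := by
  induction l with
  | nil => exact fun seq cnt => ⟨[], by simp⟩
  | cons m l ih =>
    intro seq cnt
    rw [List.foldl_cons]
    by_cases h : PySem.List.pyGetD cnt m 0 = 1
    · have hstep : ulamStepB (seq, cnt) m
          = (seq ++ [m], seq.foldl (fun c s =>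
              PySem.List.pySetD c (m + s) (PySem.List.pyGetD c (m + s) 0 + 1)) cnt) := by
        unfold ulamStepB; rw [if_pos h]
      rw [hstep]
      obtain ⟨t, ht⟩ := ih (seq ++ [m]) _
      exact ⟨[m] ++ t, by rw [ht, List.append_assoc]⟩
    · have hstep : ulamStepB (seq, cnt) m = (seq, cnt) := by
        unfold ulamStepB; rw [if_neg h]
      rw [hstep]
      exact ih seq cnt

theorem init_inv :
    cntInv [1, 2] (PySem.List.pySetD (List.replicate (2 * 2000) (0 : Int)) 3 1) := by
  rw [PySem.List.pySetD_of_nonneg _ _ (by norm_num)]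
  have hlen : ((List.replicate (2 * 2000) (0:Int)).set ((3:Int)).toNat 1).length = 4000 := by
    rw [List.length_set, List.length_replicate]
  refine ⟨hlen, ?_⟩
  intro x hx
  rw [List.getD_eq_getElem _ _ (by omega), List.getElem_set]
  have hpc : pairCnt [1, 2] (x : Int) = if (1 + 2 : Int) == (x : Int) then 1 else 0 := by
    simp [pairCnt, List.countP_cons]
  rw [hpc]
  by_cases h3 : ((3 : Int)).toNat = x
  · rw [if_pos h3]
    have : ((1 + 2 : Int) == (x : Int)) = true := by simp; omega
    rw [this]; rfl
  · rw [if_neg h3]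
    have : ((1 + 2 : Int) == (x : Int)) = false := by simp; omega
    rw [this]
    rw [List.getElem_replicate]
    rfl

theorem seq_eq :
    (let st := (PySem.List.pyRange 3 2000 1).foldl ulamStepA (([1, 2] : List Int), 0, 0)
     if st.2.1 > PySem.List.pyGetD st.1 (-1) 0 ∧ st.2.2 = 1 then st.1 ++ [st.2.1] else st.1)
    = ((PySem.List.pyRange 3 2000 1).foldl ulamStepB (([1, 2] : List Int),
        PySem.List.pySetD (List.replicate (2 * 2000) (0 : Int)) 3 1)).1 := by
  have hmain := main_fold (PySem.List.pyRange 3 2000 1) [1, 2] _ (0, 0) init_inv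
    (by intro s hs; simp at hs; omega)
    (fun m hm => PySem.List.mem_pyRange_one.mp hm)
  have hcons : PySem.List.pyRange (3:Int) 2000 1
      = 3 :: PySem.List.pyRange (4:Int) 2000 1 := by
    have := PySem.List.pyRange_one_cons (a := (3:Int)) (b := 2000) (by norm_num)
    simpa using this
  set stA := (PySem.List.pyRange 3 2000 1).foldl ulamStepA (([1, 2] : List Int), 0, 0) with hstA
  have hskip : ¬ (stA.2.1 > PySem.List.pyGetD stA.1 (-1) 0 ∧ stA.2.2 = 1) := by
    rintro ⟨hgt, hw⟩
    have hfold : stA = (PySem.List.pyRange (4:Int) 2000 1).foldl ulamStepA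
        (ulamStepA ([1, 2], 0, 0) 3) := by
      rw [hstA, hcons, List.foldl_cons]
    rw [hfold] at hgt hw
    rw [lastA _ _ _ hw] at hgt
    omega
  simp only [if_neg hskip]
  exact hmain

-- ===== VERDICT (by name: the statement is the Claim_ definition above) =====
theorem numbers_Ulam_spec : Claim_equal_numbers_Ulam := by
  unfold Claim_equal_numbers_Ulam
  intro n _
  unfold Spec_numbers_Ulam numbers_Ulam numbers_Ulam_alt
  obtain ⟨t, ht⟩ := prefixB (PySem.List.pyRange 3 2000 1) [1, 2]
    (PySem.List.pySetD (List.replicate (2 * 2000) (0 : Int)) 3 1)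
  by_cases h1 : n = 1
  · subst h1
    simp only [ht]
    rfl
  · by_cases h2 : n = 2
    · subst h2
      simp only [if_neg h1, ht]
      rfl
    · simp only [if_neg h1, if_neg h2]
      exact congrArg (fun s => PySem.List.slice s none (some n)) seq_eq
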